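-- pv_equiv track=rewrite | github.com/JasperK04/website | app/utils.py | score_token_against_words
-- ===== SOURCE A (Python) =====
-- def levenshtein(a: str, b: str) -> int:
--     """Compute Levenshtein edit distance between two strings."""
--     if a == b:
--         return 0
--     la, lb = len(a), len(b)
--     if la == 0:
--         return lb
--     if lb == 0:
--         return la
--     prev = list(range(lb + 1))
--     for i, ca in enumerate(a, 1):
--         curr = [i] + [0] * lb
--         for j, cb in enumerate(b, 1):
--             curr[j] = min(
--                 prev[j] + 1,
--                 curr[j - 1] + 1,
--                 prev[j - 1] + (0 if ca == cb else 1),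
--             )
--         prev = curr
--     return prev[lb]
--
-- def score_token_against_words(
--     token: str,
--     words: list[tuple[str, str]],
--     weight: int,
--     max_distance: int,
-- ) -> tuple[int, str | None, str | None]:
--     """Score a single query token against words from one field."""
--     best = 0
--     best_word: str | None = None
--     best_kind: str | None = None
--     for word_lower, word_original in words:
--         if token == word_lower:
--             score = 10 * weight
--             kind = "exact"
--         elif word_lower.startswith(token) or word_lower.endswith(token):
--             score = 6 * weight
--             kind = "partial"
--         elif max_distance > 0 and levenshtein(token, word_lower) <= max_distance:
--             score = 3 * weight
--             kind = "fuzzy"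
--         else:
--             continue
--
--         if score > best:
--             best = score
--             best_word = word_original
--             best_kind = kind
--
--     return best, best_word, best_kind
-- ===== SOURCE B (Python) =====
-- def levenshtein(a: str, b: str) -> int:
--     """Compute Levenshtein edit distance between two strings."""
--     if a == b:
--         return 0
--     la, lb = len(a), len(b)
--     if la == 0:
--         return lb
--     if lb == 0:
--         return la
--     prev = list(range(lb + 1))
--     for i, ca in enumerate(a, 1):
--         curr = [i] + [0] * lb
--         for j, cb in enumerate(b, 1):
--             curr[j] = min(
--                 prev[j] + 1,
--                 curr[j - 1] + 1,
--                 prev[j - 1] + (0 if ca == cb else 1),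
--             )
--         prev = curr
--     return prev[lb]
--
--
-- def score_token_against_words(token, words, weight, max_distance):
--     # A non-positive weight can never produce a positive score, so no word matches.
--     if weight <= 0:
--         return 0, None, None
--     hit = next((orig for low, orig in words if token == low), None)
--     if hit is not None:
--         return 10 * weight, hit, "exact"
--     hit = next((orig for low, orig in words
--                 if low.startswith(token) or low.endswith(token)), None)
--     if hit is not None:
--         return 6 * weight, hit, "partial"
--     if max_distance > 0:
--         hit = next((orig for low, orig in words
--                     if levenshtein(token, low) <= max_distance), None)
--         if hit is not None:
--             return 3 * weight, hit, "fuzzy"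
--     return 0, None, None
-- ===== Notes on version B (the rewrite author's own statement) =====
-- stated objective: alternative
-- what changed: Replaces A's single accumulator loop (first-strict-max over per-word scores) by three prioritized first-match scans (exact, then prefix/suffix, then fuzzy under the max_distance>0 guard), with an upfront return for non-positive weight where no score can exceed 0.
import Mathlib
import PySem

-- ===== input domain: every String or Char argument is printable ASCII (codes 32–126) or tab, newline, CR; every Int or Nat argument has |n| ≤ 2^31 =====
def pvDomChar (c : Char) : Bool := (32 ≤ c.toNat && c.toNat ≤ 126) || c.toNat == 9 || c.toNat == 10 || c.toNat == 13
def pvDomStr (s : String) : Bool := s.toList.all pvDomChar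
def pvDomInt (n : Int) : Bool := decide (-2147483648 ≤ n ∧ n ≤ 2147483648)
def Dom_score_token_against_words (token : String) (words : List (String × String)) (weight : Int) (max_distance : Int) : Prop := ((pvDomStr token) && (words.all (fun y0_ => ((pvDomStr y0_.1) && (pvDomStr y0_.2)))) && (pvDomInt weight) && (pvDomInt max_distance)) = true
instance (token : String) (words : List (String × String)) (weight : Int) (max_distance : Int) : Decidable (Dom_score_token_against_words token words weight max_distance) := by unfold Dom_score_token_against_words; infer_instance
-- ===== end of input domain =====

-- B replaces A's single first-strict-max accumulator loop by three prioritized first-match scans (alternative decomposition, same cost).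


-- ===== PORT A =====
-- shared helper (identical in Source A and Source B): Levenshtein DP, literal transliteration
def levenshtein (a b : String) : Int :=
  if a == b then 0
  else
    let la := a.toList.length
    let lb := b.toList.length
    if la == 0 then (lb : Int)
    else if lb == 0 then (la : Int)
    else
      let prev0 : List Int := (List.range (lb + 1)).map Int.ofNat
      -- for i, ca in enumerate(a, 1): build curr, then prev = curr
      let prevFinal :=
        (a.toList.foldl (fun (st : Int × List Int) ca =>
          let i := st.1
          let prev := st.2
          let curr0 : List Int := i :: List.replicate lb 0
          -- for j, cb in enumerate(b, 1): curr[j] = min(prev[j]+1, curr[j-1]+1, prev[j-1]+cost)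
          let curr :=
            (b.toList.foldl (fun (st2 : Nat × List Int) cb =>
              let j := st2.1
              let curr := st2.2
              (j + 1,
               curr.set j (min (min (prev.getD j 0 + 1) (curr.getD (j - 1) 0 + 1))
                               (prev.getD (j - 1) 0 + (if ca == cb then (0 : Int) else 1)))))
              (1, curr0)).2
          (i + 1, curr)) (1, prev0)).2
      prevFinal.getD lb 0

-- A's loop body: classify the word, then keep it only if its score strictly beats the best so far
def stepA (token : String) (weight max_distance : Int)
    (st : Int × Option String × Option String) (wp : String × String) :
    Int × Option String × Option String :=
  if token == wp.1 then
    (if 10 * weight > st.1 then (10 * weight, some wp.2, some "exact") else st)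
  else if PySem.Str.startswith wp.1 token || PySem.Str.endswith wp.1 token then
    (if 6 * weight > st.1 then (6 * weight, some wp.2, some "partial") else st)
  else if max_distance > 0 ∧ levenshtein token wp.1 ≤ max_distance then
    (if 3 * weight > st.1 then (3 * weight, some wp.2, some "fuzzy") else st)
  else st

def score_token_against_words (token : String) (words : List (String × String)) (weight : Int) (max_distance : Int) : Int × Option String × Option String :=
  words.foldl (stepA token weight max_distance) (0, none, none)

-- ===== PORT B =====
def score_token_against_words_alt (token : String) (words : List (String × String)) (weight : Int) (max_distance : Int) : Int × Option String × Option String :=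
  if weight ≤ 0 then (0, none, none)
  else
    match words.find? (fun wp => token == wp.1) with
    | some wp => (10 * weight, some wp.2, some "exact")
    | none =>
      match words.find? (fun wp => PySem.Str.startswith wp.1 token || PySem.Str.endswith wp.1 token) with
      | some wp => (6 * weight, some wp.2, some "partial")
      | none =>
        if max_distance > 0 then
          match words.find? (fun wp => decide (levenshtein token wp.1 ≤ max_distance)) with
          | some wp => (3 * weight, some wp.2, some "fuzzy")
          | none => (0, none, none)
        else (0, none, none)

-- ===== PRECONDITION & SPEC =====
def Spec_score_token_against_words (token : String) (words : List (String × String)) (weight : Int) (max_distance : Int) (out : Int × Option String × Option String) : Prop := out = score_token_against_words_alt token words weight max_distance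
instance (token : String) (words : List (String × String)) (weight : Int) (max_distance : Int) (out : Int × Option String × Option String) : Decidable (Spec_score_token_against_words token words weight max_distance out) := by unfold Spec_score_token_against_words; infer_instance

-- ===== CLAIM (what is proved, stated in full; the proofs are below) =====
def Claim_equal_score_token_against_words : Prop := ∀ (token : String) (words : List (String × String)) (weight : Int) (max_distance : Int), Dom_score_token_against_words token words weight max_distance → Spec_score_token_against_words token words weight max_distance (score_token_against_words token words weight max_distance)

-- ===== LEMMAS AND PROOFS =====

-- weight ≤ 0: no score is ever > best (= 0 initially), so A's state never changes
theorem foldl_nonpos (token : String) (weight max_distance : Int) (hw : weight ≤ 0)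
    (ws : List (String × String)) :
    ws.foldl (stepA token weight max_distance) (0, none, none) = (0, none, none) := by
  induction ws with
  | nil => rfl
  | cons w ws ih =>
    have hstep : stepA token weight max_distance (0, none, none) w = (0, none, none) := by
      unfold stepA
      split_ifs <;> simp_all <;> omega
    simp [List.foldl_cons, hstep, ih]

-- from an "exact" state, the loop never changes the state (no score exceeds 10*weight)
theorem foldl_at_exact (token : String) (weight max_distance : Int) (hw : 0 < weight)
    (ws : List (String × String)) (o k : Option String) :
    ws.foldl (stepA token weight max_distance) (10 * weight, o, k) = (10 * weight, o, k) := by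
  induction ws with
  | nil => rfl
  | cons w ws ih =>
    have hstep : stepA token weight max_distance (10 * weight, o, k) w = (10 * weight, o, k) := by
      unfold stepA
      split_ifs <;> simp_all <;> omega
    simp [List.foldl_cons, hstep, ih]

-- from a "partial" state, only the first exact word can override
theorem foldl_at_partial (token : String) (weight max_distance : Int) (hw : 0 < weight)
    (ws : List (String × String)) (o k : Option String) :
    ws.foldl (stepA token weight max_distance) (6 * weight, o, k) =
      match ws.find? (fun wp => token == wp.1) with
      | some wp => (10 * weight, some wp.2, some "exact")
      | none => (6 * weight, o, k) := by
  induction ws with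
  | nil => rfl
  | cons w ws ih =>
    by_cases he : token == w.1
    · have : stepA token weight max_distance (6 * weight, o, k) w
          = (10 * weight, some w.2, some "exact") := by
        unfold stepA
        rw [if_pos he, if_pos (by omega)]
      simp [List.foldl_cons, this, List.find?_cons, he, foldl_at_exact token weight max_distance hw]
    · have : stepA token weight max_distance (6 * weight, o, k) w = (6 * weight, o, k) := by
        unfold stepA
        rw [if_neg (by simp_all)]
        split_ifs <;> simp_all <;> omega
      simp [List.foldl_cons, this, List.find?_cons, he, ih]

-- from a "fuzzy" state, the first exact word wins, else the first partial word, else nothing changes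
theorem foldl_at_fuzzy (token : String) (weight max_distance : Int) (hw : 0 < weight)
    (ws : List (String × String)) (o k : Option String) :
    ws.foldl (stepA token weight max_distance) (3 * weight, o, k) =
      match ws.find? (fun wp => token == wp.1) with
      | some wp => (10 * weight, some wp.2, some "exact")
      | none =>
        match ws.find? (fun wp => PySem.Str.startswith wp.1 token || PySem.Str.endswith wp.1 token) with
        | some wp => (6 * weight, some wp.2, some "partial")
        | none => (3 * weight, o, k) := by
  induction ws with
  | nil => rfl
  | cons w ws ih =>
    by_cases he : token == w.1
    · have : stepA token weight max_distance (3 * weight, o, k) w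
          = (10 * weight, some w.2, some "exact") := by
        unfold stepA
        rw [if_pos he, if_pos (by omega)]
      simp [List.foldl_cons, this, List.find?_cons, he, foldl_at_exact token weight max_distance hw]
    · by_cases hp : (PySem.Chars.startswith w.1.toList token.toList || PySem.Chars.endswith w.1.toList token.toList) = true
      · have : stepA token weight max_distance (3 * weight, o, k) w
            = (6 * weight, some w.2, some "partial") := by
          unfold stepA
          rw [if_neg (by simp_all), if_pos (by simpa using hp), if_pos (by omega)]
        simp [List.foldl_cons, this, List.find?_cons, he, hp,
              foldl_at_partial token weight max_distance hw]
      · have : stepA token weight max_distance (3 * weight, o, k) w = (3 * weight, o, k) := by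
          unfold stepA
          rw [if_neg (by simp_all), if_neg (by simpa using hp)]
          split_ifs <;> simp_all <;> omega
        simp [List.foldl_cons, this, List.find?_cons, he, hp, ih]

-- from the initial state, A's loop computes exactly B's three-scan result
theorem foldl_at_zero (token : String) (weight max_distance : Int) (hw : 0 < weight)
    (ws : List (String × String)) :
    ws.foldl (stepA token weight max_distance) (0, none, none) =
      match ws.find? (fun wp => token == wp.1) with
      | some wp => (10 * weight, some wp.2, some "exact")
      | none =>
        match ws.find? (fun wp => PySem.Str.startswith wp.1 token || PySem.Str.endswith wp.1 token) with
        | some wp => (6 * weight, some wp.2, some "partial")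
        | none =>
          if max_distance > 0 then
            match ws.find? (fun wp => decide (levenshtein token wp.1 ≤ max_distance)) with
            | some wp => (3 * weight, some wp.2, some "fuzzy")
            | none => (0, none, none)
          else (0, none, none) := by
  induction ws with
  | nil => simp
  | cons w ws ih =>
    by_cases he : token == w.1
    · have : stepA token weight max_distance (0, none, none) w
          = (10 * weight, some w.2, some "exact") := by
        unfold stepA
        rw [if_pos he, if_pos (by omega)]
      simp [List.foldl_cons, this, List.find?_cons, he, foldl_at_exact token weight max_distance hw]
    · by_cases hp : (PySem.Chars.startswith w.1.toList token.toList || PySem.Chars.endswith w.1.toList token.toList) = true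
      · have : stepA token weight max_distance (0, none, none) w
            = (6 * weight, some w.2, some "partial") := by
          unfold stepA
          rw [if_neg (by simp_all), if_pos (by simpa using hp), if_pos (by omega)]
        simp [List.foldl_cons, this, List.find?_cons, he, hp,
              foldl_at_partial token weight max_distance hw]
      · by_cases hf : max_distance > 0 ∧ levenshtein token w.1 ≤ max_distance
        · have : stepA token weight max_distance (0, none, none) w
              = (3 * weight, some w.2, some "fuzzy") := by
            unfold stepA
            rw [if_neg (by simp_all), if_neg (by simpa using hp), if_pos hf, if_pos (by omega)]
          simp [List.foldl_cons, this, List.find?_cons, he, hp, hf.1, hf.2,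
                foldl_at_fuzzy token weight max_distance hw]
        · have : stepA token weight max_distance (0, none, none) w = (0, none, none) := by
            unfold stepA
            rw [if_neg (by simp_all), if_neg (by simpa using hp), if_neg hf]
          by_cases hmd : max_distance > 0
          · have hlev : ¬ levenshtein token w.1 ≤ max_distance := fun h => hf ⟨hmd, h⟩
            simp [List.foldl_cons, this, List.find?_cons, he, hp, hmd, hlev, ih]
          · simp [List.foldl_cons, this, List.find?_cons, he, hp, hmd, ih]

-- ===== VERDICT (by name: the statement is the Claim_ definition above) =====
theorem score_token_against_words_spec : Claim_equal_score_token_against_words := by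
  intro token words weight max_distance _
  unfold Spec_score_token_against_words score_token_against_words score_token_against_words_alt
  by_cases hw : weight ≤ 0
  · rw [if_pos hw, foldl_nonpos token weight max_distance hw]
  · rw [if_neg hw, foldl_at_zero token weight max_distance (by omega)]
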